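-- pv_equiv track=rewrite | github.com/EA-pro/Group-3-Emotion-regulation | scripts/toggle_rephrase.py | _remove_nlg_block
-- ===== SOURCE A (Python) =====
-- def _remove_nlg_block(lines: list[str]) -> list[str]:
--     new_lines: list[str] = []
--     idx = 0
--     while idx < len(lines):
--         line = lines[idx]
--         if line.startswith("nlg:"):
--             idx += 1
--             while idx < len(lines) and (lines[idx].startswith("  ") or not lines[idx].strip()):
--                 idx += 1
--             continue
--         new_lines.append(line)
--         idx += 1
--     return new_lines
-- ===== SOURCE B (Python) =====
-- def _remove_nlg_block(lines: list[str]) -> list[str]: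
--     # Right-to-left pass: buffer each run of indented/blank lines until its
--     # preceding non-skippable line is seen; an 'nlg:' line discards the buffer,
--     # any other line keeps it. Accumulators are kept in reverse order (appends
--     # only) and the result is reversed once at the end.
--     out_rev: list[str] = []
--     pending_rev: list[str] = []
--     for line in reversed(lines):
--         if line.startswith("  ") or not line.strip():
--             pending_rev.append(line)
--         elif line.startswith("nlg:"):
--             pending_rev = []
--         else:
--             out_rev += pending_rev
--             out_rev.append(line)
--             pending_rev = []
--     return (out_rev + pending_rev)[::-1]
-- ===== Notes on version B (the rewrite author's own statement) =====
-- stated objective: alternative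
-- what changed: Replaced A's forward index-driven nested while loops (inner loop eagerly consumes a block after its 'nlg:' header) with a single right-to-left pass that buffers each run of indented/blank lines in reverse-order accumulators and only decides to keep or discard the buffer when the preceding non-skippable line is reached, reversing the result once at the end.
import Mathlib
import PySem

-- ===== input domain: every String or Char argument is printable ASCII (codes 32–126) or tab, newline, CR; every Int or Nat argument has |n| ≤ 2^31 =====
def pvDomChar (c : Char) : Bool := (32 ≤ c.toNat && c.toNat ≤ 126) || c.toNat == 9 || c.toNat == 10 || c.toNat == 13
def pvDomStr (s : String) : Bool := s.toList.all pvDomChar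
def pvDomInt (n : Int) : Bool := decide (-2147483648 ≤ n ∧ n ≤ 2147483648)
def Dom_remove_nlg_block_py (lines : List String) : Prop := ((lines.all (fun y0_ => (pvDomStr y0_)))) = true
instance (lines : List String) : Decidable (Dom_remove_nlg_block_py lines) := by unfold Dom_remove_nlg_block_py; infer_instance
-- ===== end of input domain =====

-- B replaces A's forward nested while loops with a right-to-left pass buffering runs of
-- indented/blank lines until their preceding non-skippable line decides them; objective: alternative.

-- a line is "skippable" block content: indented by two spaces or blank
def pvSk (l : String) : Bool := PySem.Str.startswith l "  " || (PySem.Str.strip l == "")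

-- ===== PORT A =====
-- A's inner while loop: advance past block lines.
def pvSkipA : List String → List String
  | [] => []
  | l :: rest => if pvSk l then pvSkipA rest else l :: rest

theorem pvSkipA_length_le : ∀ (ls : List String), (pvSkipA ls).length ≤ ls.length
  | [] => Nat.le_refl _
  | l :: rest => by
    unfold pvSkipA
    split
    · exact Nat.le_succ_of_le (pvSkipA_length_le rest)
    · exact Nat.le_refl _

-- A's outer while loop over idx, transcribed as recursion on the suffix of `lines` from idx.
def remove_nlg_block_py (lines : List String) : List String :=
  match lines with
  | [] => []
  | line :: rest =>
    if PySem.Str.startswith line "nlg:" then remove_nlg_block_py (pvSkipA rest)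
    else line :: remove_nlg_block_py rest
termination_by lines.length
decreasing_by
  · exact Nat.lt_succ_of_le (pvSkipA_length_le rest)
  · exact Nat.lt_succ_self _

-- ===== PORT B =====
-- one step of B's right-to-left loop; state = (out_rev, pending_rev), both in reverse order
def pvStepR (st : List String × List String) (line : String) : List String × List String :=
  if pvSk line then (st.1, st.2 ++ [line])
  else if PySem.Str.startswith line "nlg:" then (st.1, [])
  else (st.1 ++ st.2 ++ [line], [])

def remove_nlg_block_py_alt (lines : List String) : List String :=
  let st := lines.reverse.foldl pvStepR ([], [])
  (st.1 ++ st.2).reverse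

-- ===== PRECONDITION & SPEC =====
def Spec_remove_nlg_block_py (lines : List String) (out : List String) : Prop := out = remove_nlg_block_py_alt lines
instance (lines : List String) (out : List String) : Decidable (Spec_remove_nlg_block_py lines out) := by unfold Spec_remove_nlg_block_py; infer_instance

-- ===== CLAIM (what is proved, stated in full; the proofs are below) =====
def Claim_equal_remove_nlg_block_py : Prop := ∀ (lines : List String), Dom_remove_nlg_block_py lines → Spec_remove_nlg_block_py lines (remove_nlg_block_py lines)

-- ===== LEMMAS AND PROOFS =====

-- a line starting with "nlg:" is neither indented by two spaces nor blank
theorem pvNlgNotSk (l : String) (h : PySem.Str.startswith l "nlg:" = true) :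
    pvSk l = false := by
  unfold pvSk
  simp only [PySem.Str.startswith_eq] at h ⊢
  rw [PySem.Chars.startswith_iff] at h
  obtain ⟨t, ht⟩ := h
  have h1 : l.toList = 'n' :: 'l' :: 'g' :: ':' :: t := by rw [← ht]; rfl
  simp [PySem.Chars.startswith, h1, PySem.Str.strip, PySem.Chars.strip, PySem.Chars.lstrip,
    PySem.Chars.rstrip, List.isPrefixOf, List.dropWhile]
  exact ⟨'n', by simp [PySem.Chars.isspace], by simp [PySem.Chars.isspace]⟩

-- A's inner skip loop is dropWhile of the skippable predicate
theorem pvSkipA_eq_dropWhile : ∀ (ls : List String), pvSkipA ls = ls.dropWhile pvSk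
  | [] => rfl
  | l :: rest => by
    unfold pvSkipA
    by_cases h : pvSk l = true
    · rw [if_pos h, List.dropWhile_cons_of_pos h, pvSkipA_eq_dropWhile rest]
    · rw [if_neg h, List.dropWhile_cons_of_neg (by simpa using h)]

-- A keeps every leading skippable line
theorem pvA_prefix : ∀ (ls : List String),
    remove_nlg_block_py ls = ls.takeWhile pvSk ++ remove_nlg_block_py (ls.dropWhile pvSk)
  | [] => rfl
  | l :: rest => by
    by_cases h : pvSk l = true
    · have hn : PySem.Str.startswith l "nlg:" = false := by
        by_contra hc
        have := pvNlgNotSk l (by revert hc; cases PySem.Str.startswith l "nlg:" <;> simp)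
        rw [this] at h; exact Bool.false_ne_true h
      rw [List.takeWhile_cons_of_pos h, List.dropWhile_cons_of_pos h]
      rw [remove_nlg_block_py, if_neg (by rw [hn]; simp), pvA_prefix rest]
      simp
    · rw [List.takeWhile_cons_of_neg (by simpa using h),
        List.dropWhile_cons_of_neg (by simpa using h)]
      simp

-- invariant of B's right-to-left fold (stated on the equivalent foldr over the list)
theorem pvFoldR_inv : ∀ (ls : List String),
    ls.foldr (fun x y => pvStepR y x) ([], [])
      = ((remove_nlg_block_py (ls.dropWhile pvSk)).reverse, (ls.takeWhile pvSk).reverse)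
  | [] => by simp [remove_nlg_block_py]
  | l :: rest => by
    rw [List.foldr_cons, pvFoldR_inv rest]
    by_cases h : pvSk l = true
    · rw [List.takeWhile_cons_of_pos h, List.dropWhile_cons_of_pos h]
      simp only [pvStepR, if_pos h, List.reverse_cons]
    · rw [List.takeWhile_cons_of_neg (by simpa using h),
        List.dropWhile_cons_of_neg (by simpa using h)]
      by_cases hn : PySem.Str.startswith l "nlg:" = true
      · simp only [pvStepR, if_neg h, if_pos hn]
        rw [show remove_nlg_block_py (l :: rest) = remove_nlg_block_py (pvSkipA rest) from by
          rw [remove_nlg_block_py, if_pos hn], pvSkipA_eq_dropWhile]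
        simp
      · simp only [pvStepR, if_neg h, if_neg hn]
        rw [show remove_nlg_block_py (l :: rest) = l :: remove_nlg_block_py rest from by
          rw [remove_nlg_block_py, if_neg hn]]
        simp [pvA_prefix rest]

-- ===== VERDICT (by name: the statement is the Claim_ definition above) =====
theorem remove_nlg_block_py_spec : Claim_equal_remove_nlg_block_py := by
  intro lines _
  unfold Spec_remove_nlg_block_py remove_nlg_block_py_alt
  rw [List.foldl_reverse, pvFoldR_inv lines]
  simp [← pvA_prefix]
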